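-- pv_equiv track=rewrite | github.com/pdecampossouza/Pipeline-for-Oral-Health-Images | codeextraction/extract_and_catalog.py | nearest_volunteer_for_page
-- ===== SOURCE A (Python) =====
-- def nearest_volunteer_for_page(pno: int, markers: dict, back: int = 1, fwd: int = 3):
--     """Search around pno for 'Voluntário N' markers. Prefer forward pages (common pattern)."""
--     # same page
--     if pno in markers and markers[pno]:
--         return markers[pno][0]
--     # forward first
--     for k in range(1, fwd+1):
--         q = pno + k
--         if q in markers and markers[q]:
--             return markers[q][0]
--     # then backward
--     for k in range(1, back+1):
--         q = pno - k
--         if q in markers and markers[q]: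
--             return markers[q][0]
--     return None
-- ===== SOURCE B (Python) =====
-- def nearest_volunteer_for_page(pno: int, markers: dict, back: int = 1, fwd: int = 3):
--     """One pass over the markers table: keep the marker whose page comes first in the
--     probe priority order (same page, then pno+1..pno+fwd, then pno-1..pno-back)."""
--     best = None
--     for q, vals in markers.items():
--         if not vals:
--             continue
--         d = q - pno
--         if d == 0:
--             r = 0                      # same page: highest priority
--         elif 0 < d <= fwd:
--             r = d                      # forward pages, nearest first
--         elif 0 < -d <= back:
--             r = max(fwd, 0) + (-d)     # backward pages, after all forward ones
--         else:
--             continue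
--         if best is None or r < best[0]:
--             best = (r, vals[0])
--     return None if best is None else best[1]
-- ===== Notes on version B (the rewrite author's own statement) =====
-- stated objective: alternative
-- what changed: Instead of probing pages around pno with three guarded loops (same page, forward range, backward range), B makes a single pass over the markers table itself, keeping the non-empty entry whose page has minimal rank in the probe priority order, so the back/fwd radii are never iterated.
import Mathlib
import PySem

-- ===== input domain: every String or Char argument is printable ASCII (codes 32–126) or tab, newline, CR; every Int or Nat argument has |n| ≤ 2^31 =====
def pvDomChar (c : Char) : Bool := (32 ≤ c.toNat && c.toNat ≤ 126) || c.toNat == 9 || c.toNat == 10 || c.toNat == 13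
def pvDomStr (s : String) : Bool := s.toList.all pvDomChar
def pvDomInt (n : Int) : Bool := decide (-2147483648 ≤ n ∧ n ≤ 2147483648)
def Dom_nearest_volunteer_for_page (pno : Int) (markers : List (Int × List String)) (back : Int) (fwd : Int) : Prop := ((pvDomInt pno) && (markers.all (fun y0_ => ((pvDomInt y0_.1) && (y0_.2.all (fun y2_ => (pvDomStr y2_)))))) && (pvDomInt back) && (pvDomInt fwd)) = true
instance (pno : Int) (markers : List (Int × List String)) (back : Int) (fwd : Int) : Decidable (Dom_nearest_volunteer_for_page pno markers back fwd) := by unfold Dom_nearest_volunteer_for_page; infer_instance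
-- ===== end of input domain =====

-- B replaces A's three probe loops around pno by a single scan of the markers table keeping
-- the entry minimal in probe-priority rank; alternative algorithm, never iterates back/fwd.

-- ===== PORT A =====
-- 'if q in markers and markers[q]: return markers[q][0]' (else fall through)
def nvLook (markers : List (Int × List String)) (q : Int) : Option String :=
  match (PySem.Dict.mk markers).get? q with
  | some (v :: _) => some v
  | _ => none

-- 'for k in range(1, fwd+1): q = pno + k; …'
def nvFwdLoop (pno : Int) (markers : List (Int × List String)) : List Int → Option String
  | [] => none
  | k :: rest =>
    match nvLook markers (pno + k) with
    | some v => some v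
    | none => nvFwdLoop pno markers rest

-- 'for k in range(1, back+1): q = pno - k; …'
def nvBackLoop (pno : Int) (markers : List (Int × List String)) : List Int → Option String
  | [] => none
  | k :: rest =>
    match nvLook markers (pno - k) with
    | some v => some v
    | none => nvBackLoop pno markers rest

def nearest_volunteer_for_page (pno : Int) (markers : List (Int × List String)) (back : Int) (fwd : Int) : Option String :=
  match nvLook markers pno with
  | some v => some v
  | none =>
    match nvFwdLoop pno markers (PySem.List.pyRange 1 (fwd + 1) 1) with
    | some v => some v
    | none => nvBackLoop pno markers (PySem.List.pyRange 1 (back + 1) 1)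

-- ===== PORT B =====
-- rank of page q in the probe priority order (none = outside the probe window)
def nvRank (pno : Int) (back : Int) (fwd : Int) (q : Int) : Option Int :=
  let d := q - pno
  if d = 0 then some 0
  else if 0 < d ∧ d ≤ fwd then some d
  else if 0 < -d ∧ -d ≤ back then some (max fwd 0 + (-d))
  else none

-- loop body: keep the best-ranked marker seen so far
def nvStep (pno : Int) (back : Int) (fwd : Int) (best : Option (Int × String)) (x : Int × List String) : Option (Int × String) :=
  match x.2 with
  | [] => best
  | v :: _ =>
    match nvRank pno back fwd x.1 with
    | none => best
    | some r =>
      match best with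
      | none => some (r, v)
      | some b => if r < b.1 then some (r, v) else best

def nearest_volunteer_for_page_alt (pno : Int) (markers : List (Int × List String)) (back : Int) (fwd : Int) : Option String :=
  match markers.foldl (nvStep pno back fwd) none with
  | none => none
  | some b => some b.2

-- ===== PRECONDITION & SPEC =====
-- Pre_ excludes association lists with duplicate page keys, which no Python dict (A's input
-- type) can represent; there A's first-match lookup and B's whole-table scan may differ.
def Pre_nearest_volunteer_for_page (pno : Int) (markers : List (Int × List String)) (back : Int) (fwd : Int) : Prop :=
  (markers.map Prod.fst).Nodup
instance (pno : Int) (markers : List (Int × List String)) (back : Int) (fwd : Int) : Decidable (Pre_nearest_volunteer_for_page pno markers back fwd) := by unfold Pre_nearest_volunteer_for_page; infer_instance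

def pvWitness_nearest_volunteer_for_page : Int × (List (Int × List String)) × Int × Int :=
  (2, [(1, ["a"]), (3, ["b"]), (4, [])], 1, 3)

def Spec_nearest_volunteer_for_page (pno : Int) (markers : List (Int × List String)) (back : Int) (fwd : Int) (out : Option String) : Prop := out = nearest_volunteer_for_page_alt pno markers back fwd
instance (pno : Int) (markers : List (Int × List String)) (back : Int) (fwd : Int) (out : Option String) : Decidable (Spec_nearest_volunteer_for_page pno markers back fwd out) := by unfold Spec_nearest_volunteer_for_page; infer_instance

-- ===== CLAIM (what is proved, stated in full; the proofs are below) =====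
def Claim_equal_nearest_volunteer_for_page : Prop := ∀ (pno : Int) (markers : List (Int × List String)) (back : Int) (fwd : Int), Dom_nearest_volunteer_for_page pno markers back fwd → Pre_nearest_volunteer_for_page pno markers back fwd → Spec_nearest_volunteer_for_page pno markers back fwd (nearest_volunteer_for_page pno markers back fwd)

-- ===== LEMMAS AND PROOFS =====

-- A's probe sequence of page offsets, in priority order
def nvOffs (back : Int) (fwd : Int) : List Int :=
  0 :: (PySem.List.pyRange 1 (fwd + 1) 1 ++ (PySem.List.pyRange 1 (back + 1) 1).map (fun k => -k))

-- first hit along a probe list, tracking the probe index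
def nvRef (m : List (Int × List String)) (p : Int) : List Int → Int → Option (Int × String)
  | [], _ => none
  | o :: t, i =>
    match nvLook m (p + o) with
    | some v => some (i, v)
    | none => nvRef m p t (i + 1)

def nvMinStep (best : Option (Int × String)) (c : Int × String) : Option (Int × String) :=
  match best with
  | none => some c
  | some b => if c.1 < b.1 then some c else best

def nvCands (p : Int) (back : Int) (fwd : Int) (m : List (Int × List String)) : List (Int × String) :=
  m.filterMap (fun x =>
    match x.2 with
    | [] => none
    | v :: _ => (nvRank p back fwd x.1).map (fun r => (r, v)))

theorem nvFwd_eq_findSome (p : Int) (m : List (Int × List String)) (l : List Int) :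
    nvFwdLoop p m l = l.findSome? (fun k => nvLook m (p + k)) := by
  induction l with
  | nil => rfl
  | cons k t ih =>
    simp only [nvFwdLoop, List.findSome?_cons]
    cases nvLook m (p + k) <;> simp [ih]

theorem nvBack_eq_findSome (p : Int) (m : List (Int × List String)) (l : List Int) :
    nvBackLoop p m l = l.findSome? (fun k => nvLook m (p - k)) := by
  induction l with
  | nil => rfl
  | cons k t ih =>
    simp only [nvBackLoop, List.findSome?_cons]
    cases nvLook m (p - k) <;> simp [ih]

theorem nvRef_snd (m : List (Int × List String)) (p : Int) (l : List Int) :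
    ∀ i, (nvRef m p l i).map Prod.snd = l.findSome? (fun o => nvLook m (p + o)) := by
  induction l with
  | nil => intro i; rfl
  | cons o t ih =>
    intro i
    simp only [nvRef, List.findSome?_cons]
    cases nvLook m (p + o) <;> simp [ih]

theorem A_eq_ref (p : Int) (m : List (Int × List String)) (back fwd : Int) :
    nearest_volunteer_for_page p m back fwd = (nvRef m p (nvOffs back fwd) 0).map Prod.snd := by
  rw [nvRef_snd]
  unfold nearest_volunteer_for_page nvOffs
  rw [nvFwd_eq_findSome, nvBack_eq_findSome]
  simp only [List.findSome?_cons, List.findSome?_append, add_zero, List.findSome?_map,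
    Function.comp_def, sub_eq_add_neg]
  cases nvLook m p
  · cases List.findSome? (fun k => nvLook m (p + k)) (PySem.List.pyRange 1 (fwd + 1) 1) <;> rfl
  · rfl

theorem B_eq_min (p back fwd : Int) (m : List (Int × List String)) :
    ∀ best, m.foldl (nvStep p back fwd) best = (nvCands p back fwd m).foldl nvMinStep best := by
  induction m with
  | nil => intro best; rfl
  | cons x t ih =>
    intro best
    simp only [List.foldl_cons, nvCands, List.filterMap_cons]
    rcases x with ⟨q, vs⟩
    cases vs with
    | nil => simpa [nvStep] using ih best
    | cons v vt =>
      cases h : nvRank p back fwd q with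
      | none => simpa [nvStep, h] using ih best
      | some r =>
        have hstep : nvStep p back fwd best (q, v :: vt) = nvMinStep best (r, v) := by
          simp [nvStep, nvMinStep, h]
        rw [hstep, ih]
        simp [nvCands]

-- one nvMinStep never yields none, and its result is bounded by both inputs
theorem minstep_some (b : Option (Int × String)) (y : Int × String) :
    ∃ c, nvMinStep b y = some c ∧ c.1 ≤ y.1 ∧ (∀ x, b = some x → c.1 ≤ x.1) ∧ (c = y ∨ b = some c) := by
  cases b with
  | none =>
    refine ⟨y, by simp [nvMinStep], le_refl _, by simp, Or.inl rfl⟩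
  | some x =>
    by_cases hx : y.1 < x.1
    · refine ⟨y, by simp [nvMinStep, hx], le_refl _, ?_, Or.inl rfl⟩
      rintro x' hx'
      rw [Option.some_inj] at hx'
      subst hx'
      omega
    · refine ⟨x, by simp [nvMinStep, hx], by omega, ?_, Or.inr rfl⟩
      rintro x' hx'
      rw [Option.some_inj] at hx'
      subst hx'
      omega

theorem foldl_minstep_some (l : List (Int × String)) :
    ∀ x, ∃ c, l.foldl nvMinStep (some x) = some c := by
  induction l with
  | nil => exact fun x => ⟨x, rfl⟩
  | cons y t ih =>
    intro x
    obtain ⟨c, hc, -⟩ := minstep_some (some x) y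
    simp only [List.foldl_cons, hc]
    exact ih c

-- the min-fold computes a member minimal in first component
theorem min_spec (l : List (Int × String)) :
    ∀ (b : Option (Int × String)),
      match l.foldl nvMinStep b with
      | none => b = none ∧ l = []
      | some c => (c ∈ l ∨ b = some c) ∧ (∀ y ∈ l, c.1 ≤ y.1) ∧ (∀ x, b = some x → c.1 ≤ x.1) := by
  induction l with
  | nil =>
    intro b
    cases b with
    | none => simp
    | some x => simp
  | cons y t ih =>
    intro b
    obtain ⟨w, hw, hwy, hwb, hwmem⟩ := minstep_some b y
    simp only [List.foldl_cons, hw]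
    obtain ⟨c, hc⟩ := foldl_minstep_some t w
    have H := ih (some w)
    rw [hc] at H ⊢
    obtain ⟨hmem, hle, hb⟩ := H
    refine ⟨?_, ?_, ?_⟩
    · rcases hmem with h | h
      · exact Or.inl (List.mem_cons_of_mem _ h)
      · rw [Option.some_inj] at h
        subst h
        rcases hwmem with h | h
        · exact Or.inl (h ▸ List.mem_cons_self ..)
        · exact Or.inr h
    · intro z hz
      rcases List.mem_cons.mp hz with h | h
      · subst h
        exact le_trans (hb w rfl) hwy
      · exact hle z h
    · intro x hx
      exact le_trans (hb w rfl) (hwb x hx)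

theorem foldl_min_none_of_nil (l : List (Int × String)) (h : l.foldl nvMinStep none = none) :
    l = [] := by
  have := min_spec l none
  rw [h] at this
  exact this.2

-- Dict lookup on nodup association lists
theorem get?_of_mem (m : List (Int × List String)) (q : Int) (vs : List String)
    (hnd : (m.map Prod.fst).Nodup) (hmem : (q, vs) ∈ m) :
    (PySem.Dict.mk m).get? q = some vs := by
  induction m with
  | nil => simp at hmem
  | cons x t ih =>
    rcases x with ⟨k, w⟩
    simp only [List.map_cons, List.nodup_cons] at hnd
    rcases List.mem_cons.mp hmem with h | h
    · simp only [Prod.mk.injEq] at h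
      obtain ⟨rfl, rfl⟩ := h
      rw [PySem.Dict.get?_mk_cons]
      simp
    · have hk : k ≠ q := by
        intro hkq; subst hkq
        exact hnd.1 (List.mem_map.mpr ⟨(k, vs), h, rfl⟩)
      rw [PySem.Dict.get?_mk_cons]
      simp only [beq_iff_eq, if_neg hk]
      exact ih hnd.2 h

theorem mem_of_get? (m : List (Int × List String)) (q : Int) (vs : List String)
    (h : (PySem.Dict.mk m).get? q = some vs) : (q, vs) ∈ m := by
  induction m with
  | nil => simp [PySem.Dict.get?] at h
  | cons x t ih =>
    rcases x with ⟨k, w⟩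
    rw [PySem.Dict.get?_mk_cons] at h
    by_cases hk : k = q
    · subst hk
      simp at h
      simp [h]
    · simp only [beq_iff_eq, if_neg hk] at h
      exact List.mem_cons_of_mem _ (ih h)

theorem nvLook_eq_some (m : List (Int × List String)) (q : Int) (v : String)
    (hnd : (m.map Prod.fst).Nodup) :
    nvLook m q = some v ↔ ∃ t, (q, v :: t) ∈ m := by
  constructor
  · intro h
    unfold nvLook at h
    cases hg : (PySem.Dict.mk m).get? q with
    | none => rw [hg] at h; simp at h
    | some vs =>
      rw [hg] at h
      cases vs with
      | nil => simp at h
      | cons v0 vt =>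
        simp at h
        subst h
        exact ⟨vt, mem_of_get? m q _ hg⟩
  · rintro ⟨t, hmem⟩
    unfold nvLook
    rw [get?_of_mem m q (v :: t) hnd hmem]

theorem mem_cands (p back fwd : Int) (m : List (Int × List String)) (r : Int) (v : String) :
    (r, v) ∈ nvCands p back fwd m ↔ ∃ q t, (q, v :: t) ∈ m ∧ nvRank p back fwd q = some r := by
  unfold nvCands
  rw [List.mem_filterMap]
  constructor
  · rintro ⟨⟨q, vs⟩, hmem, hres⟩
    cases vs with
    | nil => simp at hres
    | cons v0 vt =>
      simp only [Option.map_eq_some_iff] at hres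
      obtain ⟨r0, hr0, heq⟩ := hres
      simp only [Prod.mk.injEq] at heq
      obtain ⟨h1, h2⟩ := heq
      exact ⟨q, vt, by rw [h2] at hmem; exact hmem, by rw [← h1]; exact hr0⟩
  · rintro ⟨q, t, hmem, hr⟩
    exact ⟨(q, v :: t), hmem, by simp [hr]⟩

-- element of the probe sequence at a given index
theorem offs_get (back fwd : Int) (n : Nat) :
    (nvOffs back fwd)[n]? =
      if (n : Int) = 0 then some 0
      else if (n : Int) ≤ max fwd 0 then some (n : Int)
      else if (n : Int) ≤ max fwd 0 + max back 0 then some (max fwd 0 - (n : Int)) else none := by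
  unfold nvOffs
  cases n with
  | zero => simp
  | succ m =>
    have hF : (PySem.List.pyRange 1 (fwd + 1) 1).length = fwd.toNat := by
      rw [PySem.List.length_pyRange_one]; omega
    have hB : (PySem.List.pyRange 1 (back + 1) 1).length = back.toNat := by
      rw [PySem.List.length_pyRange_one]; omega
    simp only [List.getElem?_cons_succ, List.getElem?_append, hF, List.length_map]
    have hmax : (fwd.toNat : Int) = max fwd 0 := Int.toNat_eq_max fwd
    by_cases h1 : m < fwd.toNat
    · rw [if_pos h1, PySem.List.getElem?_pyRange_one, if_pos (show m < (fwd + 1 - 1).toNat by omega),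
        if_neg (show ¬ (((m + 1 : Nat) : Int) = 0) by push_cast; omega),
        if_pos (show ((m + 1 : Nat) : Int) ≤ max fwd 0 by push_cast; omega)]
      simp only [Option.some_inj]
      push_cast
      omega
    · rw [if_neg h1, List.getElem?_map, PySem.List.getElem?_pyRange_one]
      by_cases h2 : m - fwd.toNat < (back + 1 - 1).toNat
      · rw [if_pos h2,
          if_neg (show ¬ (((m + 1 : Nat) : Int) = 0) by push_cast; omega),
          if_neg (show ¬ (((m + 1 : Nat) : Int) ≤ max fwd 0) by push_cast; omega),
          if_pos (show ((m + 1 : Nat) : Int) ≤ max fwd 0 + max back 0 by push_cast; omega)]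
        simp only [Option.map_some, Option.some_inj]
        push_cast
        omega
      · rw [if_neg h2,
          if_neg (show ¬ (((m + 1 : Nat) : Int) = 0) by push_cast; omega),
          if_neg (show ¬ (((m + 1 : Nat) : Int) ≤ max fwd 0) by push_cast; omega),
          if_neg (show ¬ (((m + 1 : Nat) : Int) ≤ max fwd 0 + max back 0) by push_cast; omega)]
        simp

-- rank r of page p + d ⟺ d sits at probe index r
theorem rank_iff (p back fwd d r : Int) :
    nvRank p back fwd (p + d) = some r ↔ (0 ≤ r ∧ (nvOffs back fwd)[r.toNat]? = some d) := by
  unfold nvRank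
  simp only [add_sub_cancel_left]
  rw [offs_get, Int.toNat_eq_max]
  constructor
  · intro h
    split_ifs at h with h0 hf hb <;> simp only [Option.some_inj] at h
    · refine ⟨by omega, ?_⟩
      rw [if_pos (by omega)]
      simp only [Option.some_inj]
      omega
    · refine ⟨by omega, ?_⟩
      rw [if_neg (by omega), if_pos (by omega)]
      simp only [Option.some_inj]
      omega
    · refine ⟨by omega, ?_⟩
      rw [if_neg (by omega), if_neg (by omega), if_pos (by omega)]
      simp only [Option.some_inj]
      omega
  · rintro ⟨hr, hg⟩
    split_ifs at hg with h0 hf hb <;> simp only [Option.some_inj] at hg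
    · rw [if_pos (by omega)]
      simp only [Option.some_inj]
      omega
    · rw [if_neg (by omega), if_pos (by omega)]
      simp only [Option.some_inj]
      omega
    · rw [if_neg (by omega), if_neg (by omega), if_pos (by omega)]
      simp only [Option.some_inj]
      omega

theorem ref_none (m : List (Int × List String)) (p : Int) (l : List Int)
    (h : ∀ o ∈ l, nvLook m (p + o) = none) : ∀ i, nvRef m p l i = none := by
  induction l with
  | nil => intro i; rfl
  | cons o t ih =>
    intro i
    simp only [nvRef]
    rw [h o (by simp)]
    exact ih (fun o' ho' => h o' (List.mem_cons_of_mem _ ho')) (i + 1)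

theorem ref_hit (m : List (Int × List String)) (p : Int) (l : List Int) :
    ∀ (i r : Int) (v : String),
      (∃ k : Nat, r = i + k ∧ (l[k]?.bind (fun o => nvLook m (p + o))) = some v) →
      (∀ k : Nat, i + (k : Int) < r → (l[k]?.bind (fun o => nvLook m (p + o))) = none) →
      nvRef m p l i = some (r, v) := by
  induction l with
  | nil =>
    rintro i r v ⟨k, _, hk⟩ _
    simp at hk
  | cons o t ih =>
    rintro i r v ⟨k, hrk, hk⟩ hmin
    simp only [nvRef]
    cases hl : nvLook m (p + o) with
    | some v0 =>
      have hir : ¬ (i < r) := by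
        intro hlt
        have := hmin 0 (by simpa using hlt)
        simp [hl] at this
      have hk0 : k = 0 := by omega
      subst hk0
      simp [hl] at hk
      simp only [Nat.cast_zero, add_zero] at hrk
      rw [hrk, hk]
    | none =>
      cases k with
      | zero => simp [hl] at hk
      | succ k' =>
        apply ih (i + 1) r v
        · exact ⟨k', by push_cast at hrk ⊢; omega, by simpa using hk⟩
        · intro k'' hk''
          have := hmin (k'' + 1) (by push_cast; omega)
          simpa using this

-- every entry found by a probe is a candidate
theorem cand_of_probe (p back fwd : Int) (m : List (Int × List String))
    (hnd : (m.map Prod.fst).Nodup) (n : Nat) (o : Int) (v : String)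
    (hn : (nvOffs back fwd)[n]? = some o) (hlv : nvLook m (p + o) = some v) :
    ((n : Int), v) ∈ nvCands p back fwd m := by
  obtain ⟨t, hmem⟩ := (nvLook_eq_some m (p + o) v hnd).mp hlv
  have hrank : nvRank p back fwd (p + o) = some (n : Int) := by
    rw [rank_iff]
    exact ⟨Int.natCast_nonneg n, by simpa using hn⟩
  exact (mem_cands p back fwd m _ v).mpr ⟨p + o, t, hmem, hrank⟩

-- ===== VERDICT (by name: the statement is the Claim_ definition above) =====
theorem nearest_volunteer_for_page_spec : Claim_equal_nearest_volunteer_for_page := by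
  intro p m back fwd _ hnd
  unfold Pre_nearest_volunteer_for_page at hnd
  unfold Spec_nearest_volunteer_for_page
  rw [A_eq_ref]
  unfold nearest_volunteer_for_page_alt
  rw [B_eq_min]
  cases hmin : (nvCands p back fwd m).foldl nvMinStep none with
  | none =>
    -- no candidate: no probe can hit
    have hnil := foldl_min_none_of_nil _ hmin
    have hnone : ∀ o ∈ nvOffs back fwd, nvLook m (p + o) = none := by
      intro o ho
      cases hlv : nvLook m (p + o) with
      | none => rfl
      | some v =>
        exfalso
        obtain ⟨n, hlt, he⟩ := List.mem_iff_getElem.mp ho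
        have hn : (nvOffs back fwd)[n]? = some o := by
          rw [List.getElem?_eq_some_iff]
          exact ⟨hlt, he⟩
        have := cand_of_probe p back fwd m hnd n o v hn hlv
        rw [hnil] at this
        simp at this
    rw [ref_none m p (nvOffs back fwd) hnone 0]
    rfl
  | some c =>
    have H := min_spec (nvCands p back fwd m) none
    rw [hmin] at H
    obtain ⟨hmem, hle, -⟩ := H
    have hmem' : c ∈ nvCands p back fwd m := by
      rcases hmem with h | h
      · exact h
      · simp at h
    rcases c with ⟨r, v⟩
    obtain ⟨q, t, hqmem, hq⟩ := (mem_cands p back fwd m r v).mp hmem'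
    have hq' : nvRank p back fwd (p + (q - p)) = some r := by
      rw [show p + (q - p) = q by ring]
      exact hq
    obtain ⟨hr0, hoff⟩ := (rank_iff p back fwd (q - p) r).mp hq'
    have hhit : ∃ k : Nat, r = (0 : Int) + k ∧
        (((nvOffs back fwd)[k]?).bind (fun o => nvLook m (p + o))) = some v := by
      refine ⟨r.toNat, by omega, ?_⟩
      rw [hoff]
      simp only [Option.bind_some]
      rw [show p + (q - p) = q by ring]
      exact (nvLook_eq_some m q v hnd).mpr ⟨t, hqmem⟩
    have hmiss : ∀ k : Nat, (0 : Int) + (k : Int) < r →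
        (((nvOffs back fwd)[k]?).bind (fun o => nvLook m (p + o))) = none := by
      intro k hk
      simp only [zero_add] at hk
      cases hko : (nvOffs back fwd)[k]? with
      | none => simp
      | some o =>
        simp only [Option.bind_some]
        cases hlv : nvLook m (p + o) with
        | none => rfl
        | some v' =>
          exfalso
          have hc := cand_of_probe p back fwd m hnd k o v' hko hlv
          have := hle _ hc
          simp at this
          omega
    rw [ref_hit m p (nvOffs back fwd) 0 r v hhit hmiss]
    rfl
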